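-- pv_equiv track=rewrite | github.com/MarkpageBxl/AdventOfCode | 2024/09/part2.py | compute_free_ranges
-- ===== SOURCE A (Python) =====
-- import heapq
-- from collections import defaultdict
--
-- def compute_free_ranges(free_list: list[int]) -> dict[int, list[int]]:
--     # return a dict where keys are range size and values are respective start indices
--     free_blocks = free_list[:]
--     result = defaultdict(list)
--     range_size = 0
--     start_block = heapq.heappop(free_blocks)
--     prev_block = start_block - 1
--     current_block = start_block
--     while True:
--         if current_block != prev_block + 1:
--             result[range_size].append(start_block)
--             start_block = current_block
--             range_size = 1
--         else:
--             range_size += 1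
--         prev_block = current_block
--         if not free_blocks:
--             break
--         current_block = heapq.heappop(free_blocks)
--     result[range_size].append(start_block)
--     for k in result:
--         heapq.heapify(result[k])
--     return result
-- ===== SOURCE B (Python) =====
-- import heapq
-- from collections import defaultdict
--
-- def compute_free_ranges(free_list: list[int]) -> dict[int, list[int]]:
--     # Drain the (heap-ordered) block list first, then split the drained
--     # sequence into maximal consecutive runs with an index scan.
--     blocks = free_list[:]
--     seq = [heapq.heappop(blocks) for _ in range(len(blocks))]
--     result = defaultdict(list)
--     i, n = 0, len(seq)
--     while i < n:
--         j = i + 1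
--         while j < n and seq[j] == seq[j - 1] + 1:
--             j += 1
--         result[j - i].append(seq[i])
--         i = j
--     for k in result:
--         heapq.heapify(result[k])
--     return result
-- ===== Notes on version B (the rewrite author's own statement) =====
-- stated objective: alternative
-- what changed: B drains the heap into a list first and then groups maximal consecutive runs with a separate index scan over the drained sequence, instead of A's single state machine (range_size/start_block/prev_block) interleaved with the heap pops; the per-key heapify is kept.
-- crash fix: On the empty list A raises IndexError (it pops before its loop); B's comprehension pops zero times and returns the empty dict. — e.g. on compute_free_ranges([]): A raises IndexError, B returns []
import Mathlib
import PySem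

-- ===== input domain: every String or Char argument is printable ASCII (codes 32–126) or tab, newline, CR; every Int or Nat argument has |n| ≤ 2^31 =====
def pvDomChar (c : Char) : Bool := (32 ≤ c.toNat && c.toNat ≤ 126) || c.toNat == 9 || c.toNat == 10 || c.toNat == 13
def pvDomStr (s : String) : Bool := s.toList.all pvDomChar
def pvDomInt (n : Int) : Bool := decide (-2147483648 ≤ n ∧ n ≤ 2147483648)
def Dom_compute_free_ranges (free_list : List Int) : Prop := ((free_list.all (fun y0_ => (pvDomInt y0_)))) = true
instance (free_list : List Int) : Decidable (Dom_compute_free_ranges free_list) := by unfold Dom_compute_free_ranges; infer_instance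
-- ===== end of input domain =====

-- B drains the heap into a list first and then groups maximal consecutive runs by an
-- index scan, instead of A's state machine interleaved with the pops (objective: alternative
-- decomposition, same cost). A pops from a local copy, so neither version mutates its argument.

-- ===== SHARED heapq PRIMITIVES (exact ports of CPython's heapq, used by both Pythons) =====
-- Loops are ported as structural recursion on a fuel bound chosen at the call site to be
-- exact (each loop's iteration count is bounded by it, and the base case coincides with the
-- loop's exit), so every definition is kernel-reducible.

-- the while-loop of heapq._siftdown (newitem = heap[pos] is read once before the loop;
-- each iteration moves pos to its parent (pos-1)>>1, so pos iterations suffice)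
def pvSiftdownLoop : Nat → Array Int → Nat → Nat → Int → Array Int
  | 0, heap, _, pos, newitem => heap.set! pos newitem
  | fuel + 1, heap, startpos, pos, newitem =>
    if startpos < pos then
      if newitem < heap.getD ((pos - 1) / 2) 0 then
        pvSiftdownLoop fuel (heap.set! pos (heap.getD ((pos - 1) / 2) 0)) startpos ((pos - 1) / 2)
          newitem
      else heap.set! pos newitem
    else heap.set! pos newitem

-- heapq._siftdown(heap, startpos, pos)
def pvSiftdown (heap : Array Int) (startpos pos : Nat) : Array Int :=
  pvSiftdownLoop pos heap startpos pos (heap.getD pos 0)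

-- `childpos` after the right-child test inside heapq._siftup's loop
def pvChild (heap : Array Int) (endpos pos : Nat) : Nat :=
  if 2 * pos + 2 < endpos ∧ ¬ heap.getD (2 * pos + 1) 0 < heap.getD (2 * pos + 2) 0
  then 2 * pos + 2 else 2 * pos + 1

-- the while-loop of heapq._siftup: follows a child down to a leaf (pos strictly grows,
-- bounded by endpos, so endpos iterations suffice); returns the array and the final pos
def pvSiftupLoop : Nat → Array Int → Nat → Nat → Array Int × Nat
  | 0, heap, _, pos => (heap, pos)
  | fuel + 1, heap, endpos, pos =>
    if 2 * pos + 1 < endpos then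
      pvSiftupLoop fuel (heap.set! pos (heap.getD (pvChild heap endpos pos) 0)) endpos
        (pvChild heap endpos pos)
    else (heap, pos)

-- heapq._siftup(heap, pos)
def pvSiftup (heap : Array Int) (pos : Nat) : Array Int :=
  pvSiftdown ((pvSiftupLoop heap.size heap heap.size pos).1.set!
    (pvSiftupLoop heap.size heap heap.size pos).2 (heap.getD pos 0)) pos
    (pvSiftupLoop heap.size heap heap.size pos).2

-- heapq.heappop(heap); none = IndexError on an empty list
def pvHeappop (heap : Array Int) : Option (Int × Array Int) :=
  if heap.size = 0 then none            -- lastelt = heap.pop() on []: IndexError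
  else if heap.pop.size ≠ 0 then        -- lastelt is heap.getD (heap.size - 1) 0, read before the pop
    some (heap.pop.getD 0 0, pvSiftup ((heap.pop).set! 0 (heap.getD (heap.size - 1) 0)) 0)
  else some (heap.getD (heap.size - 1) 0, heap.pop)

-- heapq.heapify applied to a value list of the result dict
def pvHeapifyList (xs : List Int) : List Int :=
  ((List.range (xs.length / 2)).reverse.foldl (fun h i => pvSiftup h i) xs.toArray).toList

-- defaultdict(list): result[k].append(v)
def pvAppend (d : PySem.Dict Int (List Int)) (k : Int) (v : Int) : PySem.Dict Int (List Int) :=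
  d.insert k (d.getD k [] ++ [v])

-- ===== PORT A =====

-- the `if current_block != prev_block + 1: … else: …` head of A's loop body:
-- the updated (result, range_size, start_block)
def computeStepA (result : PySem.Dict Int (List Int)) (range_size start_block prev_block
    current_block : Int) : PySem.Dict Int (List Int) × Int × Int :=
  if current_block ≠ prev_block + 1
  then (pvAppend result range_size start_block, 1, current_block)
  else (result, range_size + 1, start_block)

-- A's `while True` loop: process current_block, then pop the next block (or break);
-- fuel = number of blocks still in the heap, one pop per iteration
def computeLoopA : Nat → Array Int → PySem.Dict Int (List Int) → Int → Int → Int → Int →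
    PySem.Dict Int (List Int)
  | 0, _, result, range_size, start_block, prev_block, current_block =>
      -- fuel 0 ↔ the heap is empty: `if not free_blocks: break`, then the final append
      pvAppend (computeStepA result range_size start_block prev_block current_block).1
        (computeStepA result range_size start_block prev_block current_block).2.1
        (computeStepA result range_size start_block prev_block current_block).2.2
  | fuel + 1, heap, result, range_size, start_block, prev_block, current_block =>
      match pvHeappop heap with
      | none =>
          pvAppend (computeStepA result range_size start_block prev_block current_block).1
            (computeStepA result range_size start_block prev_block current_block).2.1
            (computeStepA result range_size start_block prev_block current_block).2.2
      | some (c, h') =>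
          computeLoopA fuel h'
            (computeStepA result range_size start_block prev_block current_block).1
            (computeStepA result range_size start_block prev_block current_block).2.1
            (computeStepA result range_size start_block prev_block current_block).2.2
            current_block c

def compute_free_ranges (free_list : List Int) : List (Int × List Int) :=
  match pvHeappop free_list.toArray with
  | none => []                                  -- heappop on []: IndexError, excluded by Pre_
  | some (start_block, heap) =>
      (computeLoopA heap.size heap PySem.Dict.empty 0 start_block (start_block - 1)
        start_block).items.map
        (fun kv => (kv.1, pvHeapifyList kv.2))  -- `for k in result: heapq.heapify(result[k])`

-- ===== PORT B =====

-- `[heapq.heappop(blocks) for _ in range(len(blocks))]`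
def pvDrain : Nat → Array Int → List Int
  | 0, _ => []
  | k + 1, heap =>
    match pvHeappop heap with
    | none => []                                -- unreachable: k + 1 pops of a size-(k+1) list
    | some (x, h') => x :: pvDrain k h'

-- inner `while j < n and seq[j] == seq[j-1] + 1: j += 1` (indices always in range: 1 ≤ j;
-- fuel = n bounds the iteration count n - j)
def innerScanB : Nat → List Int → Nat → Nat → Nat
  | 0, _, _, j => j
  | fuel + 1, seq, n, j =>
    if j < n ∧ seq.getD j 0 = seq.getD (j - 1) 0 + 1 then innerScanB fuel seq n (j + 1) else j

-- outer `while i < n` loop: close the maximal run [i, j); fuel = n bounds n - i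
def outerScanB : Nat → List Int → Nat → Nat → PySem.Dict Int (List Int) →
    PySem.Dict Int (List Int)
  | 0, _, _, _, result => result
  | fuel + 1, seq, n, i, result =>
    if i < n then
      outerScanB fuel seq n (innerScanB n seq n (i + 1))
        (pvAppend result ((innerScanB n seq n (i + 1) : Int) - (i : Int)) (seq.getD i 0))
    else result

def compute_free_ranges_alt (free_list : List Int) : List (Int × List Int) :=
  let seq := pvDrain free_list.toArray.size free_list.toArray
  (outerScanB seq.length seq seq.length 0 PySem.Dict.empty).items.map
    (fun kv => (kv.1, pvHeapifyList kv.2))      -- `for k in result: heapq.heapify(result[k])`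

-- ===== PRECONDITION & SPEC =====

-- A pops from the block list before its loop, so it raises IndexError on the empty list;
-- Pre_ excludes exactly that input.
def Pre_compute_free_ranges (free_list : List Int) : Prop := free_list ≠ []
instance (free_list : List Int) : Decidable (Pre_compute_free_ranges free_list) := by
  unfold Pre_compute_free_ranges; infer_instance

def pvWitness_compute_free_ranges : List Int := [0, 1, 3]

-- On the empty list A raises IndexError; B returns the empty dict.
def Raises_compute_free_ranges (free_list : List Int) : Prop := free_list = []
instance (free_list : List Int) : Decidable (Raises_compute_free_ranges free_list) := by
  unfold Raises_compute_free_ranges; infer_instance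

def pvRaiseWitness_compute_free_ranges : List Int := []
def pvRaiseWitnessOut_compute_free_ranges : List (Int × List Int) := []

def Spec_compute_free_ranges (free_list : List Int) (out : List (Int × List Int)) : Prop :=
  out = compute_free_ranges_alt free_list
instance (free_list : List Int) (out : List (Int × List Int)) :
    Decidable (Spec_compute_free_ranges free_list out) := by
  unfold Spec_compute_free_ranges; infer_instance

-- ===== CLAIM (what is proved, stated in full; the proofs are below) =====
def Claim_equal_compute_free_ranges : Prop := ∀ (free_list : List Int), Dom_compute_free_ranges free_list → Pre_compute_free_ranges free_list → Spec_compute_free_ranges free_list (compute_free_ranges free_list)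

def Claim_raises_compute_free_ranges : Prop := (∀ (free_list : List Int), Dom_compute_free_ranges free_list → Raises_compute_free_ranges free_list → ¬ Pre_compute_free_ranges free_list) ∧ (Dom_compute_free_ranges (pvRaiseWitness_compute_free_ranges) ∧ Raises_compute_free_ranges (pvRaiseWitness_compute_free_ranges) ∧ compute_free_ranges_alt (pvRaiseWitness_compute_free_ranges) = pvRaiseWitnessOut_compute_free_ranges)

-- ===== LEMMAS AND PROOFS =====

lemma pvSiftdownLoop_size :
    ∀ (fuel : Nat) (heap : Array Int) (startpos pos : Nat) (newitem : Int),
      (pvSiftdownLoop fuel heap startpos pos newitem).size = heap.size := by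
  intro fuel
  induction fuel with
  | zero => intro heap s p x; simp [pvSiftdownLoop, Array.set!]
  | succ f ih =>
    intro heap s p x
    simp only [pvSiftdownLoop]
    split
    · split
      · rw [ih]; simp [Array.set!]
      · simp [Array.set!]
    · simp [Array.set!]

lemma pvSiftupLoop_size :
    ∀ (fuel : Nat) (heap : Array Int) (endpos pos : Nat),
      (pvSiftupLoop fuel heap endpos pos).1.size = heap.size := by
  intro fuel
  induction fuel with
  | zero => intro heap e p; rfl
  | succ f ih =>
    intro heap e p
    simp only [pvSiftupLoop]
    split
    · rw [ih]; simp [Array.set!]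
    · rfl

lemma pvSiftup_size (heap : Array Int) (pos : Nat) : (pvSiftup heap pos).size = heap.size := by
  unfold pvSiftup pvSiftdown
  rw [pvSiftdownLoop_size]
  simp [Array.set!, pvSiftupLoop_size]

lemma pvHeappop_size {heap : Array Int} {x : Int} {h' : Array Int}
    (hpop : pvHeappop heap = some (x, h')) : h'.size + 1 = heap.size := by
  unfold pvHeappop at hpop
  split at hpop
  · exact absurd hpop (by simp)
  · split at hpop
    next =>
      simp only [Option.some.injEq, Prod.mk.injEq] at hpop
      obtain ⟨-, h2⟩ := hpop
      subst h2
      rw [pvSiftup_size]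
      simp only [Array.set!, Array.size_setIfInBounds, Array.size_pop]
      omega
    next =>
      simp only [Option.some.injEq, Prod.mk.injEq] at hpop
      obtain ⟨-, h2⟩ := hpop
      subst h2
      simp only [Array.size_pop]
      omega

lemma pvHeappop_eq_none_iff (heap : Array Int) : pvHeappop heap = none ↔ heap.size = 0 := by
  unfold pvHeappop
  split
  · simp_all
  · split <;> simp_all

-- A's loop over the drained sequence, as a list recursion (proof-only normal form of A)
def groupA : List Int → PySem.Dict Int (List Int) → Int → Int → Int → PySem.Dict Int (List Int)
  | [], result, rs, sb, _ => pvAppend result rs sb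
  | c :: rest, result, rs, sb, pb =>
      if c ≠ pb + 1 then groupA rest (pvAppend result rs sb) 1 c c
      else groupA rest result (rs + 1) sb c

-- open-run scan (proof-only common normal form): state = (length, start) of the open run
def runsFold : List Int → PySem.Dict Int (List Int) → Int → Int → PySem.Dict Int (List Int)
  | [], result, len, start => pvAppend result len start
  | c :: rest, result, len, start =>
      if c = start + len then runsFold rest result (len + 1) start
      else runsFold rest (pvAppend result len start) 1 c

lemma computeLoopA_eq_groupA :
    ∀ (fuel : Nat) (heap : Array Int) (result : PySem.Dict Int (List Int)) (rs sb pb cb : Int),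
      heap.size = fuel →
      computeLoopA fuel heap result rs sb pb cb = groupA (cb :: pvDrain fuel heap) result rs sb pb := by
  intro fuel
  induction fuel with
  | zero =>
    intro heap result rs sb pb cb _hsz
    by_cases hcond : cb ≠ pb + 1 <;>
      simp [computeLoopA, computeStepA, pvDrain, groupA, hcond]
  | succ f ih =>
    intro heap result rs sb pb cb hsz
    cases hpop : pvHeappop heap with
    | none =>
      have := (pvHeappop_eq_none_iff heap).mp hpop
      omega
    | some p =>
      obtain ⟨c, h'⟩ := p
      have hsz' : h'.size = f := by have := pvHeappop_size hpop; omega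
      simp only [computeLoopA, hpop, pvDrain]
      rw [ih h' _ _ _ _ _ hsz']
      by_cases hcond : cb ≠ pb + 1 <;> simp [computeStepA, groupA, hcond]

lemma groupA_eq_runsFold (xs : List Int) :
    ∀ (result : PySem.Dict Int (List Int)) (rs sb : Int),
      groupA xs result rs sb (sb + rs - 1) = runsFold xs result rs sb := by
  induction xs with
  | nil => intro result rs sb; simp [groupA, runsFold]
  | cons c rest ih =>
    intro result rs sb
    simp only [groupA, runsFold]
    rw [show sb + rs - 1 + 1 = sb + rs from by ring]
    by_cases hc : c = sb + rs
    · rw [if_neg (show ¬ c ≠ sb + rs from by omega), if_pos hc]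
      have h2 := ih result (rs + 1) sb
      rw [show sb + (rs + 1) - 1 = c from by omega] at h2
      exact h2
    · rw [if_pos (show c ≠ sb + rs from hc), if_neg hc]
      have h2 := ih (pvAppend result rs sb) 1 c
      rw [show c + 1 - 1 = c from by ring] at h2
      exact h2

lemma le_innerScanB : ∀ (fuel : Nat) (seq : List Int) (n j : Nat), j ≤ innerScanB fuel seq n j := by
  intro fuel
  induction fuel with
  | zero => intro seq n j; simp [innerScanB]
  | succ f ih =>
    intro seq n j
    simp only [innerScanB]
    split
    · exact le_trans (by omega) (ih seq n (j + 1))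
    · exact le_rfl

lemma innerScanB_fuel :
    ∀ (f1 f2 : Nat) (seq : List Int) (n j : Nat), n - j ≤ f1 → n - j ≤ f2 →
      innerScanB f1 seq n j = innerScanB f2 seq n j := by
  intro f1
  induction f1 with
  | zero =>
    intro f2 seq n j h1 _h2
    cases f2 with
    | zero => rfl
    | succ g =>
      simp only [innerScanB]
      rw [if_neg (by rintro ⟨h, -⟩; omega)]
  | succ f ih =>
    intro f2 seq n j h1 h2
    cases f2 with
    | zero =>
      simp only [innerScanB]
      rw [if_neg (by rintro ⟨h, -⟩; omega)]
    | succ g =>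
      simp only [innerScanB]
      split
      next hcond => exact ih g seq n (j + 1) (by omega) (by omega)
      next => rfl

-- one unfolding step, valid for any sufficient fuel (the recursive call keeps the same fuel)
lemma innerScanB_eq (fuel : Nat) (seq : List Int) (n j : Nat) (hf : n - j ≤ fuel) :
    innerScanB fuel seq n j =
      if j < n ∧ seq.getD j 0 = seq.getD (j - 1) 0 + 1 then innerScanB fuel seq n (j + 1)
      else j := by
  cases fuel with
  | zero =>
    rw [if_neg (by rintro ⟨h, -⟩; omega)]
    rfl
  | succ f =>
    simp only [innerScanB]
    split
    next hcond =>
      exact innerScanB_fuel f (f + 1) seq n (j + 1) (by omega) (by omega)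
    next => rfl

lemma outerScanB_fuel :
    ∀ (f1 f2 : Nat) (seq : List Int) (n i : Nat) (result : PySem.Dict Int (List Int)),
      n - i ≤ f1 → n - i ≤ f2 → outerScanB f1 seq n i result = outerScanB f2 seq n i result := by
  intro f1
  induction f1 with
  | zero =>
    intro f2 seq n i result h1 _h2
    cases f2 with
    | zero => rfl
    | succ g => simp only [outerScanB]; rw [if_neg (by omega)]
  | succ f ih =>
    intro f2 seq n i result h1 h2
    cases f2 with
    | zero => simp only [outerScanB]; rw [if_neg (by omega)]
    | succ g =>
      simp only [outerScanB]
      split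
      next hcond =>
        have hj := le_innerScanB n seq n (i + 1)
        exact ih g seq n _ _ (by omega) (by omega)
      next => rfl

-- one unfolding step, valid for any sufficient fuel (the recursive call keeps the same fuel)
lemma outerScanB_eq (fuel : Nat) (seq : List Int) (n i : Nat)
    (result : PySem.Dict Int (List Int)) (hf : n - i ≤ fuel) :
    outerScanB fuel seq n i result =
      if i < n then
        outerScanB fuel seq n (innerScanB n seq n (i + 1))
          (pvAppend result ((innerScanB n seq n (i + 1) : Int) - (i : Int)) (seq.getD i 0))
      else result := by
  cases fuel with
  | zero =>
    rw [if_neg (by omega)]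
    rfl
  | succ f =>
    simp only [outerScanB]
    split
    next hcond =>
      have hj := le_innerScanB n seq n (i + 1)
      exact outerScanB_fuel f (f + 1) seq n _ _ (by omega) (by omega)
    next => rfl

lemma runsFold_eq_outerScanB (seq : List Int) :
    ∀ (fuel i k : Nat) (result : PySem.Dict Int (List Int)),
      i < k → k ≤ seq.length → seq.length - k ≤ fuel →
      seq.getD (k - 1) 0 = seq.getD i 0 + ((k : Int) - 1 - (i : Int)) →
      runsFold (seq.drop k) result ((k : Int) - (i : Int)) (seq.getD i 0)
        = outerScanB seq.length seq seq.length (innerScanB seq.length seq seq.length k)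
            (pvAppend result ((innerScanB seq.length seq seq.length k : Int) - (i : Int))
              (seq.getD i 0)) := by
  intro fuel
  induction fuel with
  | zero =>
    intro i k result h1 h2 h3 _h4
    have hk : k = seq.length := by omega
    subst hk
    rw [List.drop_length]
    rw [innerScanB_eq _ _ _ _ (by omega), if_neg (by rintro ⟨hbad, -⟩; omega)]
    rw [outerScanB_eq _ _ _ _ _ (by omega), if_neg (by omega)]
    simp [runsFold]
  | succ f ihf =>
    intro i k result h1 h2 h3 h4
    by_cases hkn : k < seq.length
    · have hdrop : seq.drop k = seq[k] :: seq.drop (k + 1) := List.drop_eq_getElem_cons hkn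
      have hget : seq.getD k 0 = seq[k] := List.getD_eq_getElem seq 0 hkn
      rw [hdrop]
      simp only [runsFold]
      by_cases hc : seq[k] = seq.getD i 0 + ((k : Int) - (i : Int))
      · -- the run continues through position k
        rw [if_pos hc]
        rw [innerScanB_eq _ _ _ _ (by omega), if_pos ⟨hkn, by rw [hget, h4]; omega⟩]
        have hnew : seq.getD (k + 1 - 1) 0
            = seq.getD i 0 + (((k + 1 : Nat) : Int) - 1 - (i : Int)) := by
          simp only [Nat.add_sub_cancel, hget]
          push_cast
          omega
        have h := ihf i (k + 1) result (by omega) (by omega) (by omega) hnew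
        have hcast : (((k + 1 : Nat)) : Int) - (i : Int) = (k : Int) - (i : Int) + 1 := by
          push_cast; ring
        rw [hcast] at h
        exact h
      · -- position k starts a new run
        rw [if_neg hc]
        rw [innerScanB_eq _ _ _ _ (by omega),
          if_neg (by rintro ⟨-, hcon⟩; rw [hget, h4] at hcon; exact hc (by omega))]
        rw [outerScanB_eq _ _ _ _ _ (by omega), if_pos hkn]
        have hnew : seq.getD (k + 1 - 1) 0
            = seq.getD k 0 + (((k + 1 : Nat) : Int) - 1 - (k : Int)) := by
          simp only [Nat.add_sub_cancel]; push_cast; ring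
        have h := ihf k (k + 1)
          (pvAppend result ((k : Int) - (i : Int)) (seq.getD i 0))
          (by omega) (by omega) (by omega) hnew
        have hcast : (((k + 1 : Nat)) : Int) - (k : Int) = 1 := by push_cast; ring
        rw [hcast] at h
        rw [hget] at h ⊢
        exact h
    · -- k = length: close the final run
      have hk : k = seq.length := by omega
      subst hk
      rw [List.drop_length]
      rw [innerScanB_eq _ _ _ _ (by omega), if_neg (by rintro ⟨hbad, -⟩; omega)]
      rw [outerScanB_eq _ _ _ _ _ (by omega), if_neg (by omega)]
      simp [runsFold]

lemma outerScanB_eq_runsFold (x : Int) (tail : List Int) (d : PySem.Dict Int (List Int)) :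
    outerScanB (x :: tail).length (x :: tail) (x :: tail).length 0 d = runsFold tail d 1 x := by
  rw [outerScanB_eq _ _ _ _ _ (by omega), if_pos (by simp)]
  have h := runsFold_eq_outerScanB (x :: tail) (x :: tail).length 0 1 d
    (by omega) (by simp) (by omega) (by simp)
  simp only [List.drop_succ_cons, List.drop_zero, List.getD_cons_zero] at h ⊢
  rw [← h]
  norm_num

-- ===== VERDICT (by name: the statement is the Claim_ definition above) =====
theorem compute_free_ranges_spec : Claim_equal_compute_free_ranges := by
  intro free_list _hdom hpre
  unfold Spec_compute_free_ranges
  cases hpop : pvHeappop free_list.toArray with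
  | none =>
    exact absurd (by simpa using (pvHeappop_eq_none_iff _).mp hpop) hpre
  | some p =>
    obtain ⟨sb, h'⟩ := p
    have hsz : h'.size + 1 = free_list.toArray.size := pvHeappop_size hpop
    have hdrain : pvDrain free_list.toArray.size free_list.toArray = sb :: pvDrain h'.size h' := by
      rw [← hsz]; simp [pvDrain, hpop]
    simp only [compute_free_ranges, compute_free_ranges_alt, hpop, hdrain]
    congr 1
    rw [computeLoopA_eq_groupA h'.size h' _ _ _ _ _ rfl]
    have hA : groupA (sb :: pvDrain h'.size h') PySem.Dict.empty 0 sb (sb - 1)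
        = runsFold (pvDrain h'.size h') PySem.Dict.empty 1 sb := by
      have := groupA_eq_runsFold (sb :: pvDrain h'.size h') PySem.Dict.empty 0 sb
      rw [show sb + 0 - 1 = sb - 1 from by ring] at this
      rw [this]
      simp [runsFold]
    rw [hA, outerScanB_eq_runsFold]

theorem compute_free_ranges_raises : Claim_raises_compute_free_ranges := by
  unfold Claim_raises_compute_free_ranges
  refine ⟨fun fl _ hr => by
    simp [Raises_compute_free_ranges] at hr
    simp [hr, Pre_compute_free_ranges], by decide, by decide, by decide⟩

-- self-check (cites the raises theorem): B's port indeed returns the stated value at the witness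
theorem compute_free_ranges_raises_witness_ok :
    compute_free_ranges_alt pvRaiseWitness_compute_free_ranges
      = pvRaiseWitnessOut_compute_free_ranges := by
  have h := compute_free_ranges_raises
  unfold Claim_raises_compute_free_ranges at h
  exact h.2.2.2
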